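-- pv_equiv track=rewrite | github.com/avDec25/codemore | shortestColorDistance.py | shortestDistanceColor
-- ===== SOURCE A (Python) =====
-- from typing import List
-- import bisect
-- import collections
-- import math
--
-- def shortestDistanceColor(colors: List[int], queries: List[List[int]]) -> List[int]:
--   ans = []
--   cIndex = collections.defaultdict(list)
--   for i, c in enumerate(colors):
--     cIndex[c].append(i)
--
--   for q in queries:
--     i, c = q[0], q[1]
--     if c not in cIndex:
--       ans.append(-1)
--       continue
--     else:
--       c1 = bisect.bisect_left(cIndex[c], i)
--       n = len(cIndex[c])
--       if c1 >= n:
--         c1 = n-1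
--       ans.append(min([abs(cIndex[c][c1]-i), abs(cIndex[c][c1-1]-i) if (c1-1 >= 0) else math.inf]))
--
--   return ans
--
-- colors = [2,1,2,2,1]
--
-- queries = [[1,1],[4,3],[1,3],[4,2],[2,1]]
-- ===== SOURCE B (Python) =====
-- from typing import List
--
-- def shortestDistanceColor(colors: List[int], queries: List[List[int]]) -> List[int]:
--   res = []
--   for q in queries:
--     i, c = q[0], q[1]
--     best = -1
--     for j, x in enumerate(colors):
--       if x == c:
--         d = abs(j - i)
--         if best < 0 or d < best:
--           best = d
--     res.append(best)
--   return res
-- ===== Notes on version B (the rewrite author's own statement) =====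
-- stated objective: simpler
-- what changed: Replaces the color->index dict plus per-query binary search (bisect with clamped two-candidate min) by a direct single running-minimum scan of colors per query, with no dict, no bisect and no infinity sentinel.
import Mathlib
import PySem

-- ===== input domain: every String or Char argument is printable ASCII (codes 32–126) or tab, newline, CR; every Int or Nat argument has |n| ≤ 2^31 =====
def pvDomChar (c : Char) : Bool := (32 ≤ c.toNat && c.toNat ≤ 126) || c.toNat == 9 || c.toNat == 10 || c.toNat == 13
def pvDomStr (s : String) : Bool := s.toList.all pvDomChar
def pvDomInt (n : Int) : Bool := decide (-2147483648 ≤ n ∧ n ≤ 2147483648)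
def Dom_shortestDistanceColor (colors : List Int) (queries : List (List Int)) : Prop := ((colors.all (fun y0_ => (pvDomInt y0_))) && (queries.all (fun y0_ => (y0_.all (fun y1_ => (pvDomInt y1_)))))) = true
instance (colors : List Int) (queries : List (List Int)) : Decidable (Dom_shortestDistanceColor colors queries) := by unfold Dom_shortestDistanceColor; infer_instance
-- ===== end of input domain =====

-- B replaces the color→indices dict plus per-query bisect of A by a plain running-minimum
-- scan of colors for each query (objective: simpler; not faster).

-- ===== PORT A =====
-- 'for i, c in enumerate(colors): cIndex[c].append(i)'  (defaultdict(list))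
def buildCIndex (colors : List Int) : PySem.Dict Int (List Int) :=
  (PySem.List.enumerate colors 0).foldl
    (fun d p => d.modify p.2 [] (fun l => l ++ [p.1])) PySem.Dict.empty

def shortestDistanceColor (colors : List Int) (queries : List (List Int)) : List Int :=
  let cIndex := buildCIndex colors
  queries.foldl (fun ans q =>
    let i := PySem.List.pyGetD q 0 0
    let c := PySem.List.pyGetD q 1 0
    if cIndex.contains c = false then ans ++ [-1]
    else
      let idx := cIndex.getD c []
      let c1 := PySem.List.bisectLeft idx i          -- bisect.bisect_left
      let n := idx.length
      let c1' := if c1 ≥ n then n - 1 else c1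
      let a := |idx.getD c1' 0 - i|                  -- cIndex[c][c1]
      -- min([a, abs(cIndex[c][c1-1]-i) if c1-1 >= 0 else inf])
      ans ++ [if 1 ≤ c1' then min a |idx.getD (c1' - 1) 0 - i| else a]) []

-- ===== PORT B =====
def shortestDistanceColor_alt (colors : List Int) (queries : List (List Int)) : List Int :=
  queries.foldl (fun res q =>
    let i := PySem.List.pyGetD q 0 0
    let c := PySem.List.pyGetD q 1 0
    let best := (PySem.List.enumerate colors 0).foldl (fun best p =>
      if p.2 == c then
        let d := |p.1 - i|
        if best < 0 || d < best then d else best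
      else best) (-1)
    res ++ [best]) []

-- ===== PRECONDITION & SPEC =====
-- A raises IndexError on q[0]/q[1] when a query has fewer than two elements; Pre_ excludes exactly those.
def Pre_shortestDistanceColor (colors : List Int) (queries : List (List Int)) : Prop :=
  ∀ q ∈ queries, 2 ≤ q.length
instance (colors : List Int) (queries : List (List Int)) : Decidable (Pre_shortestDistanceColor colors queries) := by unfold Pre_shortestDistanceColor; infer_instance

def pvWitness_shortestDistanceColor : List Int × List (List Int) :=
  ([2, 1, 2, 2, 1], [[1, 1], [4, 3], [1, 3], [4, 2], [2, 1]])

def Spec_shortestDistanceColor (colors : List Int) (queries : List (List Int)) (out : List Int) : Prop := out = shortestDistanceColor_alt colors queries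
instance (colors : List Int) (queries : List (List Int)) (out : List Int) : Decidable (Spec_shortestDistanceColor colors queries out) := by unfold Spec_shortestDistanceColor; infer_instance

-- ===== CLAIM (what is proved, stated in full; the proofs are below) =====
def Claim_equal_shortestDistanceColor : Prop := ∀ (colors : List Int) (queries : List (List Int)), Dom_shortestDistanceColor colors queries → Pre_shortestDistanceColor colors queries → Spec_shortestDistanceColor colors queries (shortestDistanceColor colors queries)

-- ===== LEMMAS AND PROOFS =====
-- ===== LEMMAS AND PROOFS =====

-- positions of color c in colors, in increasing order
def posL (colors : List Int) (c : Int) : List Int :=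
  ((PySem.List.enumerate colors 0).filter (fun p => p.2 == c)).map (fun p => p.1)

-- A's clamped bisect index and per-query value
def aC1' (L : List Int) (i : Int) : Nat :=
  if PySem.List.bisectLeft L i ≥ L.length then L.length - 1 else PySem.List.bisectLeft L i

def aVal (L : List Int) (i : Int) : Int :=
  if 1 ≤ aC1' L i then
    min |L.getD (aC1' L i) 0 - i| |L.getD (aC1' L i - 1) 0 - i|
  else |L.getD (aC1' L i) 0 - i|

lemma getD_buildCIndex (colors : List Int) (c : Int) :
    (buildCIndex colors).getD c [] = posL colors c := by
  have h : buildCIndex colors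
      = ((PySem.List.enumerate colors 0).map Prod.swap).foldl
          (fun d p => d.modify p.1 [] (fun l => l ++ [p.2])) PySem.Dict.empty := by
    rw [List.foldl_map]
    rfl
  rw [h, PySem.Dict.getD_foldl_modify_append]
  simp [posL, List.filter_map, Function.comp_def, Prod.swap]

lemma contains_buildCIndex (colors : List Int) (c : Int) :
    (buildCIndex colors).contains c = true ↔ c ∈ colors := by
  unfold buildCIndex
  rw [PySem.Dict.contains_iff_mem_keys,
    PySem.Dict.keys_foldl_modify_key (PySem.List.enumerate colors 0) (fun p => p.2) []
      (fun d x => fun l => l ++ [x.1]) PySem.Dict.empty]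
  rw [show ((PySem.List.enumerate colors 0).map (fun p => p.2)) = colors from
    PySem.List.map_snd_enumerate colors 0]
  simp [PySem.Dict.keys_empty, PySem.Set.mem_update]

lemma mem_colors_iff (colors : List Int) (c : Int) :
    c ∈ colors ↔ ∃ p ∈ PySem.List.enumerate colors 0, p.2 = c := by
  constructor
  · intro hc
    obtain ⟨k, hk, rfl⟩ := List.mem_iff_getElem.mp hc
    refine ⟨((0 : Int) + k, colors[k]), ?_, rfl⟩
    rw [PySem.List.mem_enumerate_iff]
    exact ⟨k, hk, rfl⟩
  · rintro ⟨p, hp, rfl⟩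
    rw [PySem.List.mem_enumerate_iff] at hp
    obtain ⟨k, hk, rfl⟩ := hp
    simp
lemma posL_eq_nil_iff (colors : List Int) (c : Int) :
    posL colors c = [] ↔ c ∉ colors := by
  unfold posL
  rw [List.map_eq_nil_iff, List.filter_eq_nil_iff, mem_colors_iff]
  constructor
  · rintro h ⟨p, hp, hpc⟩
    have := h p hp
    simp only [beq_iff_eq] at this
    exact this hpc
  · intro h p hp
    simpa using fun hpc => h ⟨p, hp, hpc⟩

lemma posL_pairwise (colors : List Int) (c : Int) :
    (posL colors c).Pairwise (· < ·) := by
  unfold posL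
  rw [List.pairwise_map]
  exact (PySem.List.pairwise_lt_enumerate colors 0).filter _

-- the inner (monotone-nonneg) phase of B's running minimum
lemma bFold_min (i : Int) : ∀ (t : List Int) (a : Int), 0 ≤ a →
    t.foldl (fun best j => if best < 0 || |j - i| < best then |j - i| else best) a
      = t.foldl (fun b j => min b |j - i|) a := by
  intro t
  induction t with
  | nil => intro a _; rfl
  | cons x t ih =>
    intro a ha
    have hstep : (if a < 0 || |x - i| < a then |x - i| else a) = min a |x - i| := by
      rcases lt_or_ge (|x - i|) a with h | h
      · simp [h, min_eq_right (le_of_lt h), not_lt.mpr ha]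
      · simp [not_lt.mpr h, not_lt.mpr ha, min_eq_left h]
    simp only [List.foldl_cons, hstep]
    exact ih _ (le_min ha (abs_nonneg _))

-- B's inner loop computes -1 on the empty position list, else the minimum distance
lemma bVal_eq (colors : List Int) (i c : Int) :
    (PySem.List.enumerate colors 0).foldl (fun best p =>
        if p.2 == c then
          if best < 0 || |p.1 - i| < best then |p.1 - i| else best
        else best) (-1)
      = match posL colors c with
        | [] => -1
        | x :: t => (t.map (fun j => |j - i|)).foldl min (|x - i|) := by
  rw [PySem.List.foldl_if_eq_foldl_filter]
  have h : ((PySem.List.enumerate colors 0).filter (fun p => p.2 == c)).foldl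
      (fun best p => if best < 0 || |p.1 - i| < best then |p.1 - i| else best) (-1)
      = (posL colors c).foldl (fun best j => if best < 0 || |j - i| < best then |j - i| else best) (-1) := by
    unfold posL; rw [List.foldl_map]
  rw [h]
  cases hL : posL colors c with
  | nil => rfl
  | cons x t =>
    simp only [List.foldl_cons]
    have h0 : (if (-1 : Int) < 0 || |x - i| < -1 then |x - i| else -1) = |x - i| := by
      norm_num
    rw [h0, bFold_min i t (|x - i|) (abs_nonneg _), List.foldl_map]

-- strict sortedness gives index monotonicity
lemma sorted_mono {L : List Int} (hs : L.Pairwise (· < ·)) {k k' : ℕ}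
    (hk' : k' < L.length) (hkk : k ≤ k') : L[k]'(lt_of_le_of_lt hkk hk') ≤ L[k'] := by
  rcases lt_or_eq_of_le hkk with h | h
  · exact le_of_lt (List.pairwise_iff_getElem.mp hs k k' _ hk' h)
  · subst h; exact le_refl _

-- A's clamped two-candidate bisect value is a minimum of the distances
lemma aVal_mem_and_le (L : List Int) (i : Int) (hne : L ≠ [])
    (hs : L.Pairwise (· < ·)) :
    aVal L i ∈ L.map (fun j => |j - i|) ∧ ∀ y ∈ L.map (fun j => |j - i|), aVal L i ≤ y := by
  have hsle : L.Pairwise (· ≤ ·) := hs.imp le_of_lt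
  obtain ⟨hlen, hlt, hge⟩ := PySem.List.bisectLeft_spec L i hsle
  have hn : 0 < L.length := List.length_pos_iff.mpr hne
  have hc1'lt : aC1' L i < L.length := by unfold aC1'; split <;> omega
  have hgetc1' : L.getD (aC1' L i) 0 = L[aC1' L i]'hc1'lt := List.getD_eq_getElem L 0 hc1'lt
  have hVa : aVal L i ≤ |L.getD (aC1' L i) 0 - i| := by
    unfold aVal
    split
    · exact min_le_left _ _
    · exact le_refl _
  have hVb : 1 ≤ aC1' L i → aVal L i ≤ |L.getD (aC1' L i - 1) 0 - i| := by
    intro h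
    unfold aVal
    rw [if_pos h]
    exact min_le_right _ _
  constructor
  · unfold aVal
    split
    · rcases min_choice (|L.getD (aC1' L i) 0 - i|) (|L.getD (aC1' L i - 1) 0 - i|) with h | h <;> rw [h]
      · exact List.mem_map.mpr ⟨L[aC1' L i]'hc1'lt, List.getElem_mem _, by rw [hgetc1']⟩
      · have h1 : aC1' L i - 1 < L.length := by omega
        exact List.mem_map.mpr ⟨L[aC1' L i - 1]'h1, List.getElem_mem _,
          by rw [List.getD_eq_getElem L 0 h1]⟩
    · exact List.mem_map.mpr ⟨L[aC1' L i]'hc1'lt, List.getElem_mem _, by rw [hgetc1']⟩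
  intro y hy
  obtain ⟨j, hj, rfl⟩ := List.mem_map.mp hy
  obtain ⟨k, hk, rfl⟩ := List.mem_iff_getElem.mp hj
  by_cases hkc : PySem.List.bisectLeft L i ≤ k
  · -- k is at or right of the insertion point: L[c1'] = L[c1] is nearest from below-or-equal
    have hcn : PySem.List.bisectLeft L i < L.length := lt_of_le_of_lt hkc hk
    have he : aC1' L i = PySem.List.bisectLeft L i := by unfold aC1'; rw [if_neg (by omega)]
    have h1 : i ≤ L[aC1' L i]'hc1'lt := hge _ hc1'lt (by omega)
    have h2 : L[aC1' L i]'hc1'lt ≤ L[k] := sorted_mono hs hk (by omega)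
    calc aVal L i ≤ |L.getD (aC1' L i) 0 - i| := hVa
      _ ≤ |L[k] - i| := by
          rw [hgetc1', abs_of_nonneg (by omega), abs_of_nonneg (by omega)]; omega
  · rw [not_le] at hkc
    by_cases hcn : L.length ≤ PySem.List.bisectLeft L i
    · -- every element is left of i; the clamped last element is nearest
      have he : aC1' L i = L.length - 1 := by unfold aC1'; rw [if_pos (by omega)]
      have h2 : L[k] ≤ L[aC1' L i]'hc1'lt := sorted_mono hs hc1'lt (by omega)
      have h3 : L[aC1' L i]'hc1'lt < i := hlt _ hc1'lt (by omega)
      calc aVal L i ≤ |L.getD (aC1' L i) 0 - i| := hVa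
        _ ≤ |L[k] - i| := by
            rw [hgetc1', abs_of_nonpos (by omega), abs_of_nonpos (by omega)]; omega
    · -- k is strictly left of the insertion point: L[c1'-1] is nearest from the left
      rw [not_le] at hcn
      have he : aC1' L i = PySem.List.bisectLeft L i := by unfold aC1'; rw [if_neg (by omega)]
      have h1 : aC1' L i - 1 < L.length := by omega
      have h2 : L[k] ≤ L[aC1' L i - 1]'h1 := sorted_mono hs h1 (by omega)
      have h3 : L[aC1' L i - 1]'h1 < i := hlt _ h1 (by omega)
      calc aVal L i ≤ |L.getD (aC1' L i - 1) 0 - i| := hVb (by omega)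
        _ ≤ |L[k] - i| := by
            rw [List.getD_eq_getElem L 0 h1, abs_of_nonpos (by omega), abs_of_nonpos (by omega)]
            omega

-- per-query agreement
lemma perQuery (colors : List Int) (i c : Int) :
    (if (buildCIndex colors).contains c = false then (-1 : Int)
     else aVal ((buildCIndex colors).getD c []) i)
      = (PySem.List.enumerate colors 0).foldl (fun best p =>
          if p.2 == c then
            if best < 0 || |p.1 - i| < best then |p.1 - i| else best
          else best) (-1) := by
  rw [bVal_eq, getD_buildCIndex]
  cases hL : posL colors c with
  | nil =>
    have hc : c ∉ colors := (posL_eq_nil_iff colors c).mp hL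
    simp [eq_false_of_ne_true (fun h => hc ((contains_buildCIndex colors c).mp h))]
  | cons x t =>
    have hcmem : c ∈ colors := by
      by_contra h
      rw [(posL_eq_nil_iff colors c).mpr h] at hL
      simp at hL
    rw [(contains_buildCIndex colors c).mpr hcmem]
    simp only [Bool.true_eq_false, if_false]
    have hs : (x :: t).Pairwise (· < ·) := hL ▸ posL_pairwise colors c
    obtain ⟨hmem, hle⟩ := aVal_mem_and_le (x :: t) i (List.cons_ne_nil x t) hs
    have hM := PySem.List.foldl_min_le (t.map (fun j => |j - i|)) (|x - i|)
    have hMmem := PySem.List.foldl_min_mem (t.map (fun j => |j - i|)) (|x - i|)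
    apply le_antisymm
    · rcases hMmem with h | h
      · rw [h]; exact hle _ (by simp)
      · exact hle _ (by simp only [List.map_cons, List.mem_cons]; exact Or.inr h)
    · rcases (List.mem_map.mp hmem) with ⟨j, hj, hjv⟩
      rcases List.mem_cons.mp hj with rfl | hjt
      · rw [← hjv]; exact hM.1
      · rw [← hjv]; exact hM.2 _ (List.mem_map.mpr ⟨j, hjt, rfl⟩)

-- ===== VERDICT (by name: the statement is the Claim_ definition above) =====
theorem shortestDistanceColor_spec : Claim_equal_shortestDistanceColor := by
  intro colors queries _ _
  unfold Spec_shortestDistanceColor shortestDistanceColor shortestDistanceColor_alt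
  show List.foldl (fun (ans : List Int) (q : List Int) =>
      let i := PySem.List.pyGetD q 0 0
      let c := PySem.List.pyGetD q 1 0
      if (buildCIndex colors).contains c = false then ans ++ [-1]
      else
        let idx := (buildCIndex colors).getD c []
        let c1 := PySem.List.bisectLeft idx i
        let n := idx.length
        let c1' := if c1 ≥ n then n - 1 else c1
        let a := |idx.getD c1' 0 - i|
        ans ++ [if 1 ≤ c1' then min a |idx.getD (c1' - 1) 0 - i| else a]) [] queries
    = List.foldl (fun (res : List Int) (q : List Int) =>
        res ++ [(PySem.List.enumerate colors 0).foldl (fun best p =>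
          if p.2 == PySem.List.pyGetD q 1 0 then
            if best < 0 || |p.1 - PySem.List.pyGetD q 0 0| < best then
              |p.1 - PySem.List.pyGetD q 0 0|
            else best
          else best) (-1)]) [] queries
  have hA : (fun (ans : List Int) (q : List Int) =>
      let i := PySem.List.pyGetD q 0 0
      let c := PySem.List.pyGetD q 1 0
      if (buildCIndex colors).contains c = false then ans ++ [-1]
      else
        let idx := (buildCIndex colors).getD c []
        let c1 := PySem.List.bisectLeft idx i
        let n := idx.length
        let c1' := if c1 ≥ n then n - 1 else c1
        let a := |idx.getD c1' 0 - i|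
        ans ++ [if 1 ≤ c1' then min a |idx.getD (c1' - 1) 0 - i| else a])
      = fun ans q => ans ++ [(fun (q : List Int) =>
          if (buildCIndex colors).contains (PySem.List.pyGetD q 1 0) = false then (-1 : Int)
          else aVal ((buildCIndex colors).getD (PySem.List.pyGetD q 1 0) [])
            (PySem.List.pyGetD q 0 0)) q] := by
    funext ans q
    simp only []
    split
    · rfl
    · rfl
  rw [hA, PySem.List.foldl_append_singleton_eq_map, PySem.List.foldl_append_singleton_eq_map]
  simp only [List.nil_append]
  apply List.map_congr_left
  intro q _
  exact perQuery colors (PySem.List.pyGetD q 0 0) (PySem.List.pyGetD q 1 0)
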